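-- pv_equiv track=rewrite | github.com/Brewgarten/storm-thunder | storm/utils/util.py | sortHostnames
-- ===== SOURCE A (Python) =====
-- def sortHostnames(hostnames):
--     """
--     Sort fully qualified hostnames based on their domain hierarchy. Note that aliases and
--     non-qualified names will come after the fully qualified ones.
--
--     :param hostnames: hostnames
--     :type hostnames: [str]
--     :returns: sorted hostnames
--     :rtype: [str]
--     """
--     hostnameParts = []
--     aliases = []
--     for hostname in hostnames:
--         parts = hostname.split(".")
--         if len(parts) > 1:
--             parts.reverse()
--             hostnameParts.append(parts)
--         else:
--             aliases.append(hostname)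
--
--     hostnameParts.sort()
--     aliases.sort()
--
--     sortedHostnames = [".".join(reversed(hostnamePart)) for hostnamePart in hostnameParts]
--     sortedHostnames.extend(aliases)
--     return sortedHostnames
-- ===== SOURCE B (Python) =====
-- def sortHostnames(hostnames):
--     """Single stable sort with a composite key: qualified names first, ordered by
--     reversed domain parts; aliases (no dot) after, ordered as plain strings."""
--     def key(hostname):
--         parts = hostname.split(".")
--         if len(parts) > 1:
--             parts.reverse()
--             return (0, parts)
--         return (1, [hostname])
--     return sorted(hostnames, key=key)
-- ===== Notes on version B (the rewrite author's own statement) =====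
-- stated objective: simpler
-- what changed: Replaces the partition-into-two-buckets plus two separate sorts plus string reconstruction with one stable sorted() over the input using a composite key (0, reversed parts) for qualified names and (1, [name]) for aliases.
import Mathlib
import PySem

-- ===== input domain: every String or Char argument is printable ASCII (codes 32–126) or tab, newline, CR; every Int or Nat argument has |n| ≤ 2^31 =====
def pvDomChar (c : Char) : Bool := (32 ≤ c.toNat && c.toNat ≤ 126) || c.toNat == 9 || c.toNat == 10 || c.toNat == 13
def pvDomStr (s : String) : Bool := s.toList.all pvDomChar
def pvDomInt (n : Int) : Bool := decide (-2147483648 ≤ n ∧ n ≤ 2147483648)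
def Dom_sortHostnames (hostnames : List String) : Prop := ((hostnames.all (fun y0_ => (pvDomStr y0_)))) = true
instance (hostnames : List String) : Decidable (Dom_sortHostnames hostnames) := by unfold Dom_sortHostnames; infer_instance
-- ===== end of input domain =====

-- B replaces A's partition + two sorts + string reconstruction by ONE stable sort with a
-- composite key ((0, reversed parts) for qualified names, (1, [name]) for aliases): simpler.

-- shared thin wrapper for Python's hostname.split("."): "." ≠ "" so split? always returns some
def pySplitDot (hostname : String) : List String := (PySem.Str.split? hostname ".").getD []

-- ===== PORT A =====
def sortHostnames (hostnames : List String) : List String :=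
  -- the for-loop building hostnameParts (reversed parts of qualified names) and aliases
  let acc := hostnames.foldl
    (fun (st : List (List String) × List String) hostname =>
      let parts := pySplitDot hostname
      if 1 < parts.length then (st.1 ++ [parts.reverse], st.2)
      else (st.1, st.2 ++ [hostname]))
    ([], [])
  let hostnameParts := PySem.List.sorted acc.1 (fun x => x) false
  let aliases := PySem.List.sorted acc.2 (fun x => x) false
  (hostnameParts.map (fun p => PySem.Str.join "." p.reverse)) ++ aliases

-- ===== PORT B =====
-- Source B's key returns a pair; per the PySem convention a tuple key is ported as sorted2 with
-- the two components as separate key functions.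
def altKey1 (hostname : String) : Int :=
  if 1 < (pySplitDot hostname).length then 0 else 1
def altKey2 (hostname : String) : List String :=
  if 1 < (pySplitDot hostname).length then (pySplitDot hostname).reverse else [hostname]

def sortHostnames_alt (hostnames : List String) : List String :=
  PySem.List.sorted2 hostnames altKey1 altKey2 false

-- ===== PRECONDITION & SPEC =====
def Spec_sortHostnames (hostnames : List String) (out : List String) : Prop := out = sortHostnames_alt hostnames
instance (hostnames : List String) (out : List String) : Decidable (Spec_sortHostnames hostnames out) := by unfold Spec_sortHostnames; infer_instance

-- ===== CLAIM (what is proved, stated in full; the proofs are below) =====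
def Claim_equal_sortHostnames : Prop := ∀ (hostnames : List String), Dom_sortHostnames hostnames → Spec_sortHostnames hostnames (sortHostnames hostnames)

-- ===== LEMMAS AND PROOFS =====

-- the composite key of B, as a single lexicographic key
def hKey (hostname : String) : Lex (Int × List String) := toLex (altKey1 hostname, altKey2 hostname)

-- PySem.List.sorted does not depend on the choice of the Decidable instance
theorem pysorted_congr_inst {α κ : Type} {i1 i2 : LT κ} (d1 : @DecidableLT κ i1)
    (d2 : @DecidableLT κ i2) (h : i1 = i2) (xs : List α) (key : α → κ) (rev : Bool) :
    @PySem.List.sorted α κ i1 d1 xs key rev = @PySem.List.sorted α κ i2 d2 xs key rev := by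
  subst h
  have : d1 = d2 := by funext a b; exact Subsingleton.elim _ _
  rw [this]

-- splitOn.go with a non-empty accumulator just prepends the accumulated pieces
theorem go_acc (sep : List Char) (hsep : sep ≠ []) :
    ∀ (fuel : Nat) (l cur : List Char) (acc : List (List Char)), l.length ≤ fuel →
      PySem.Chars.splitOn.go sep fuel l cur acc =
        acc.reverse ++ PySem.Chars.splitOn.go sep fuel l cur [] := by
  have hsl : 1 ≤ sep.length := by
    cases sep with
    | nil => exact absurd rfl hsep
    | cons x xs => simp
  intro fuel
  induction fuel with
  | zero => intro l cur acc _; simp [PySem.Chars.splitOn.go]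
  | succ n ih =>
    intro l cur acc hlen
    cases l with
    | nil => simp [PySem.Chars.splitOn.go]
    | cons c rest =>
      by_cases hp : sep.isPrefixOf (c :: rest)
      · have hd : (List.drop sep.length (c :: rest)).length ≤ n := by
          rw [List.length_drop, List.length_cons]
          simp only [List.length_cons] at hlen
          omega
        simp only [PySem.Chars.splitOn.go, hp, if_true]
        rw [ih _ _ _ hd, ih _ _ [List.reverse cur] hd]
        simp
      · have hr : rest.length ≤ n := by
          simp only [List.length_cons] at hlen; omega
        simp only [PySem.Chars.splitOn.go, hp, Bool.false_eq_true, if_false]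
        exact ih _ _ _ hr

theorem go_ne_nil (sep : List Char) (fuel : Nat) (l cur : List Char) (acc : List (List Char)) :
    PySem.Chars.splitOn.go sep fuel l cur acc ≠ [] := by
  induction fuel generalizing l cur acc with
  | zero => simp [PySem.Chars.splitOn.go]
  | succ n ih =>
    cases l with
    | nil => simp [PySem.Chars.splitOn.go]
    | cons c rest =>
      by_cases hp : sep.isPrefixOf (c :: rest)
      · simp only [PySem.Chars.splitOn.go, hp, if_true]; exact ih _ _ _
      · simp only [PySem.Chars.splitOn.go, hp, Bool.false_eq_true, if_false]; exact ih _ _ _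

theorem join_go (sep : List Char) (hsep : sep ≠ []) :
    ∀ (fuel : Nat) (l cur : List Char), l.length ≤ fuel →
      PySem.Chars.join sep (PySem.Chars.splitOn.go sep fuel l cur []) = cur.reverse ++ l := by
  have hsl : 1 ≤ sep.length := by
    cases sep with
    | nil => exact absurd rfl hsep
    | cons x xs => simp
  intro fuel
  induction fuel with
  | zero =>
    intro l cur _
    simp [PySem.Chars.splitOn.go, PySem.Chars.join_singleton]
  | succ n ih =>
    intro l cur hlen
    cases l with
    | nil => simp [PySem.Chars.splitOn.go, PySem.Chars.join_singleton]
    | cons c rest =>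
      by_cases hp : sep.isPrefixOf (c :: rest)
      · have hpre : sep <+: (c :: rest) := List.isPrefixOf_iff_prefix.mp hp
        obtain ⟨t, ht⟩ := hpre
        have hd : List.drop sep.length (c :: rest) = t := by
          rw [← ht, List.drop_left]
        have hdl : t.length ≤ n := by
          have h2 := congrArg List.length ht
          simp only [List.length_append, List.length_cons] at h2 hlen
          omega
        simp only [PySem.Chars.splitOn.go, hp, if_true, hd]
        rw [go_acc sep hsep n t [] [cur.reverse] hdl]
        obtain ⟨q, r, hqr⟩ : ∃ q r, PySem.Chars.splitOn.go sep n t [] [] = q :: r := by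
          cases h : PySem.Chars.splitOn.go sep n t [] [] with
          | nil => exact absurd h (go_ne_nil sep n t [] [])
          | cons q r => exact ⟨q, r, rfl⟩
        have hjoin : PySem.Chars.join sep (PySem.Chars.splitOn.go sep n t [] []) = t := by
          simpa using ih t [] hdl
        rw [hqr] at hjoin ⊢
        simp only [List.reverse_cons, List.reverse_nil, List.nil_append,
          List.singleton_append, PySem.Chars.join_cons_cons, hjoin]
        rw [← ht]
        simp
      · have hr : rest.length ≤ n := by
          simp only [List.length_cons] at hlen; omega
        simp only [PySem.Chars.splitOn.go, hp, Bool.false_eq_true, if_false]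
        rw [ih rest (c :: cur) hr]
        simp

theorem join_splitOn (sep : List Char) (hsep : sep ≠ []) (s : List Char) :
    PySem.Chars.join sep (PySem.Chars.splitOn s sep) = s := by
  unfold PySem.Chars.splitOn
  simpa using join_go sep hsep (s.length + 1) s [] (by omega)

theorem pySplitDot_eq (h : String) :
    pySplitDot h = (PySem.Chars.splitOn h.toList ['.']).map String.ofList := by
  simp [pySplitDot, PySem.Str.split?, PySem.Chars.split?]

-- '.'.join(h.split('.')) == h, on the Str side
theorem join_pySplitDot (h : String) : PySem.Str.join "." (pySplitDot h) = h := by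
  rw [← String.toList_inj, PySem.Str.toList_join, pySplitDot_eq]
  rw [List.map_map]
  have hmap : (String.toList ∘ String.ofList) = (id : List Char → List Char) := by
    funext p; simp
  rw [hmap, List.map_id]
  have hdot : ".".toList = ['.'] := by decide
  rw [hdot]
  exact join_splitOn ['.'] (by simp) h.toList

theorem hKey_injective (a b : String) (h : hKey a = hKey b) : a = b := by
  unfold hKey at h
  have h' := toLex_inj.mp h
  have h1 : altKey1 a = altKey1 b := congrArg Prod.fst h'
  have h2 : altKey2 a = altKey2 b := congrArg Prod.snd h'
  by_cases qa : 1 < (pySplitDot a).length <;> by_cases qb : 1 < (pySplitDot b).length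
  · simp only [altKey2, qa, qb, if_true] at h2
    have hsp : pySplitDot a = pySplitDot b := List.reverse_inj.mp h2
    have hja := join_pySplitDot a
    rw [hsp, join_pySplitDot b] at hja
    exact hja.symm
  · simp [altKey1, qa, qb] at h1
  · simp [altKey1, qa, qb] at h1
  · simpa [altKey2, qa, qb] using h2

-- B is the insertion sort of the input by the single lexicographic key hKey
theorem alt_eq_sorted (hostnames : List String) :
    sortHostnames_alt hostnames = PySem.List.sorted hostnames hKey false := by
  unfold sortHostnames_alt PySem.List.sorted2
  rw [PySem.List.sorted_eq_foldl_insertBy]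
  simp only [Bool.false_eq_true, if_false]
  have hbe : (fun a b => decide (altKey1 a < altKey1 b) ||
        (!decide (altKey1 b < altKey1 a) && decide (altKey2 a < altKey2 b)))
      = (fun a b => decide (hKey a < hKey b)) := by
    funext a b
    have hiff : (altKey1 a < altKey1 b ∨ ¬ altKey1 b < altKey1 a ∧ altKey2 a < altKey2 b)
        ↔ hKey a < hKey b := by
      unfold hKey
      rw [Prod.Lex.lt_iff]
      simp only [ofLex_toLex]
      constructor
      · rintro (h | ⟨h1, h2⟩)
        · exact Or.inl h
        · rcases lt_trichotomy (altKey1 a) (altKey1 b) with h' | h' | h'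
          · exact Or.inl h'
          · exact Or.inr ⟨h', h2⟩
          · exact absurd h' h1
      · rintro (h | ⟨h1, h2⟩)
        · exact Or.inl h
        · exact Or.inr ⟨by rw [h1]; exact lt_irrefl _, h2⟩
    rw [← decide_eq_decide.mpr hiff]
    by_cases h1 : altKey1 a < altKey1 b <;> by_cases h2 : altKey1 b < altKey1 a <;>
      by_cases h3 : altKey2 a < altKey2 b <;> simp [h1, h2, h3]
    infer_instance
  rw [hbe]

-- characterisation of A's partition loop
def qB (h : String) : Bool := decide (1 < (pySplitDot h).length)

theorem loopA (hostnames : List String) :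
    ∀ (accP : List (List String)) (accA : List String),
      hostnames.foldl
        (fun (st : List (List String) × List String) hostname =>
          let parts := pySplitDot hostname
          if 1 < parts.length then (st.1 ++ [parts.reverse], st.2)
          else (st.1, st.2 ++ [hostname]))
        (accP, accA) =
      (accP ++ (hostnames.filter qB).map (fun h => (pySplitDot h).reverse),
       accA ++ hostnames.filter (fun h => !qB h)) := by
  induction hostnames with
  | nil => intro accP accA; simp
  | cons h t ih =>
    intro accP accA
    by_cases hq : 1 < (pySplitDot h).length
    · simp only [List.foldl_cons, if_pos hq, List.filter_cons]
      rw [ih]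
      simp [qB, hq]
    · simp only [List.foldl_cons, if_neg hq, List.filter_cons]
      rw [ih]
      simp [qB, hq]

theorem sortA_perm (hostnames : List String) : (sortHostnames hostnames).Perm hostnames := by
  unfold sortHostnames
  rw [loopA hostnames [] []]
  simp only [List.nil_append]
  have h1 : ((PySem.List.sorted ((hostnames.filter qB).map (fun h => (pySplitDot h).reverse))
        (fun x => x) false).map (fun p => PySem.Str.join "." p.reverse)).Perm
      (hostnames.filter qB) := by
    have hp := (PySem.List.sorted_perm ((hostnames.filter qB).map
        (fun h => (pySplitDot h).reverse)) (fun x => x) false).map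
        (fun p => PySem.Str.join "." p.reverse)
    refine hp.trans ?_
    rw [List.map_map]
    have hc : ((fun p => PySem.Str.join "." p.reverse) ∘ fun h => (pySplitDot h).reverse)
        = fun h => h := by
      funext h
      simp only [Function.comp, List.reverse_reverse]
      exact join_pySplitDot h
    rw [hc]
    simp
  have h2 : (PySem.List.sorted (hostnames.filter (fun h => !qB h)) (fun x => x) false).Perm
      (hostnames.filter (fun h => !qB h)) :=
    PySem.List.sorted_perm _ _ _
  exact (h1.append h2).trans (List.filter_append_perm qB hostnames)

theorem hKey_of_qual (h : String) (hq : 1 < (pySplitDot h).length) :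
    hKey h = toLex (0, (pySplitDot h).reverse) := by
  unfold hKey altKey1 altKey2
  rw [if_pos hq, if_pos hq]

theorem hKey_of_alias (h : String) (hq : ¬ 1 < (pySplitDot h).length) :
    hKey h = toLex (1, [h]) := by
  unfold hKey altKey1 altKey2
  rw [if_neg hq, if_neg hq]

theorem sortA_pairwise (hostnames : List String) :
    (sortHostnames hostnames).Pairwise (fun a b => hKey a ≤ hKey b) := by
  unfold sortHostnames
  rw [loopA hostnames [] []]
  simp only [List.nil_append]
  set P := (hostnames.filter qB).map (fun h => (pySplitDot h).reverse) with hP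
  set Al := hostnames.filter (fun h => !qB h) with hAl
  have memP : ∀ p ∈ PySem.List.sorted P (fun x => x) false,
      hKey (PySem.Str.join "." p.reverse) = toLex (0, p) := by
    intro p hp
    rw [PySem.List.mem_sorted] at hp
    rw [hP] at hp
    obtain ⟨h, hh, rfl⟩ := List.mem_map.mp hp
    have hq : 1 < (pySplitDot h).length := by
      simpa [qB] using (List.mem_filter.mp hh).2
    rw [List.reverse_reverse, join_pySplitDot, hKey_of_qual h hq]
  have memA : ∀ a ∈ PySem.List.sorted Al (fun x => x) false, hKey a = toLex (1, [a]) := by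
    intro a ha
    rw [PySem.List.mem_sorted] at ha
    rw [hAl] at ha
    have hna : ¬ 1 < (pySplitDot a).length := by
      simpa [qB] using (List.mem_filter.mp ha).2
    exact hKey_of_alias a hna
  rw [List.pairwise_append]
  refine ⟨?_, ?_, ?_⟩
  · rw [List.pairwise_map]
    have hpw : (PySem.List.sorted P (fun x : List String => x) false).Pairwise
        (fun a b => a ≤ b) := by
      rw [pysorted_congr_inst _ (LinearOrder.toDecidableLT) rfl]
      exact PySem.List.sorted_pairwise P (fun x => x)
    refine List.Pairwise.imp_of_mem ?_ hpw
    intro p q hp hq hle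
    rw [memP p hp, memP q hq, Prod.Lex.le_iff]
    simp only [ofLex_toLex]
    exact Or.inr ⟨by trivial, hle⟩
  · have hpw : (PySem.List.sorted Al (fun x : String => x) false).Pairwise
        (fun a b => a ≤ b) := by
      rw [pysorted_congr_inst _ (LinearOrder.toDecidableLT) rfl]
      exact PySem.List.sorted_pairwise Al (fun x => x)
    refine List.Pairwise.imp_of_mem ?_ hpw
    intro a b ha hb hle
    rw [memA a ha, memA b hb, Prod.Lex.le_iff]
    simp only [ofLex_toLex]
    refine Or.inr ⟨by trivial, ?_⟩
    rcases lt_or_eq_of_le hle with h' | h'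
    · exact le_of_lt (List.Lex.rel h')
    · rw [h']
  · intro x hx y hy
    obtain ⟨p, hp, rfl⟩ := List.mem_map.mp hx
    rw [memP p hp, memA y hy]
    apply le_of_lt
    rw [Prod.Lex.lt_iff]
    simp only [ofLex_toLex]
    left
    norm_num

-- ===== VERDICT (by name: the statement is the Claim_ definition above) =====
theorem sortHostnames_spec : Claim_equal_sortHostnames := by
  intro hostnames _
  unfold Spec_sortHostnames
  have hperm : (sortHostnames hostnames).Perm (sortHostnames_alt hostnames) := by
    refine (sortA_perm hostnames).trans ?_
    rw [alt_eq_sorted]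
    exact (PySem.List.sorted_perm hostnames hKey false).symm
  refine List.Perm.eq_of_pairwise ?_ (sortA_pairwise hostnames) ?_ hperm
  · intro a b _ _ h1 h2
    exact hKey_injective a b (le_antisymm h1 h2)
  · rw [alt_eq_sorted]
    exact PySem.List.sorted_pairwise hostnames hKey
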